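-- pv_equiv track=rewrite | github.com/ArturBlachnio/ArturWebApp | awa/iplan/utils.py | reorder_tasks
-- ===== SOURCE A (Python) =====
-- def reorder_tasks(direction, task_id, current_order_of_ids):
--     """ Takes current task id plus ids of all other tasks (in scope) and returns dict of id and new order
--     If task_id not in list, returns same order_of_list
--     Directions can be:
--     up - move one position up
--     down - move one position down
--     top - move to the beginning
--     bottom - move to the end
--     """
--     if task_id not in current_order_of_ids:
--         return current_order_of_ids
--
--     task_index = current_order_of_ids.index(task_id)
--
--     new_order = current_order_of_ids.copy()
--     new_order.pop(task_index)
--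
--     if direction == 'up':
--         # If gets to -1 it's getting from end of list
--         new_order.insert(max(0, task_index - 1), task_id)
--     elif direction == 'down':
--         # Can not get higher than lenght of list
--         new_order.insert(min((len(new_order)), task_index + 1), task_id)
--     elif direction == 'top':
--         new_order.insert(0, task_id)
--     elif direction == 'bottom':
--         new_order.insert(len(new_order), task_id)
--     else:
--         new_order.insert(task_index, task_id)
--
--     outcome_order = []
--     for task_id in current_order_of_ids:
--         outcome_order.append(new_order.index(task_id))
--     return outcome_order
-- ===== SOURCE B (Python) =====
-- def reorder_tasks(direction, task_id, current_order_of_ids):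
--     if task_id not in current_order_of_ids:
--         return current_order_of_ids
--
--     n = len(current_order_of_ids)
--     i = current_order_of_ids.index(task_id)
--
--     if direction == 'up':
--         p = max(0, i - 1)
--     elif direction == 'down':
--         p = min(n - 1, i + 1)
--     elif direction == 'top':
--         p = 0
--     elif direction == 'bottom':
--         p = n - 1
--     else:
--         p = i
--
--     # New position of the element at original index k, by pure arithmetic
--     # (no reordered list is ever built); a duplicated value reports the
--     # smallest new position among its occurrences (= first occurrence).
--     best = {}
--     for k, x in enumerate(current_order_of_ids):
--         if k == i:
--             q = p
--         else:
--             j = k if k < i else k - 1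
--             q = j + 1 if j >= p else j
--         if x not in best or q < best[x]:
--             best[x] = q
--     return [best[x] for x in current_order_of_ids]
-- ===== Notes on version B (the rewrite author's own statement) =====
-- stated objective: alternative
-- what changed: B never builds the reordered list: it computes each element's new position by pure index arithmetic (shift-by-one around the insert position p) in one enumerate pass, keeping the per-value minimum position in a dict, instead of A's copy/pop/insert list surgery and per-element new_order.index scans.
import Mathlib
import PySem

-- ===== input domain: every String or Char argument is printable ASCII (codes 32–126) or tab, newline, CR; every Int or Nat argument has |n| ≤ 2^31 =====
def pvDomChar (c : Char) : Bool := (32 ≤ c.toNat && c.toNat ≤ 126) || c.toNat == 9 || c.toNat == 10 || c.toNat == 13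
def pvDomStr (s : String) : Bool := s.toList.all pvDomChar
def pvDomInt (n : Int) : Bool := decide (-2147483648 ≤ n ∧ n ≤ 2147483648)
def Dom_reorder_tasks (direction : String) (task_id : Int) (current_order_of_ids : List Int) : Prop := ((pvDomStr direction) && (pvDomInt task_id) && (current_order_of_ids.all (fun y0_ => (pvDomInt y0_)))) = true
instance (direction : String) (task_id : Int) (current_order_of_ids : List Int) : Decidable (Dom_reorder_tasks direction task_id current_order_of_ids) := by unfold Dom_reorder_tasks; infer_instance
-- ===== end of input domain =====

-- B never constructs the reordered list: it computes each element's new position by pure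
-- index arithmetic around the insert position, keeping the per-value minimum in one pass
-- (a different algorithm, equal results everywhere).

-- ===== PORT A =====
def reorder_tasks (direction : String) (task_id : Int) (current_order_of_ids : List Int) : List Int :=
  if task_id ∈ current_order_of_ids then
    let task_index : Nat := (PySem.List.index? current_order_of_ids task_id).getD 0
    -- new_order = current_order_of_ids.copy(); new_order.pop(task_index)  (pop cannot fail: index of a member)
    let popped : List Int := (PySem.List.pop? current_order_of_ids (task_index : Int)).elim [] Prod.snd
    let new_order : List Int :=
      if direction == "up" then
        PySem.List.insert popped (max 0 ((task_index : Int) - 1)) task_id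
      else if direction == "down" then
        PySem.List.insert popped (min (popped.length : Int) ((task_index : Int) + 1)) task_id
      else if direction == "top" then
        PySem.List.insert popped 0 task_id
      else if direction == "bottom" then
        PySem.List.insert popped (popped.length : Int) task_id
      else
        PySem.List.insert popped (task_index : Int) task_id
    -- outcome_order = []; for t in current_order_of_ids: outcome_order.append(new_order.index(t))
    current_order_of_ids.foldl
      (fun acc t => acc ++ [(((PySem.List.index? new_order t).getD 0 : Nat) : Int)]) []
  else current_order_of_ids

-- ===== PORT B =====
def reorder_tasks_alt (direction : String) (task_id : Int) (current_order_of_ids : List Int) : List Int :=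
  if task_id ∈ current_order_of_ids then
    let n : Nat := current_order_of_ids.length
    let i : Nat := (PySem.List.index? current_order_of_ids task_id).getD 0
    let p : Int :=
      if direction == "up" then max 0 ((i : Int) - 1)
      else if direction == "down" then min ((n : Int) - 1) ((i : Int) + 1)
      else if direction == "top" then 0
      else if direction == "bottom" then (n : Int) - 1
      else (i : Int)
    -- best = {}; for k, x in enumerate(xs): q = …; if x not in best or q < best[x]: best[x] = q
    let best : PySem.Dict Int Int :=
      (PySem.List.enumerate current_order_of_ids 0).foldl
        (fun d kx =>
          let q : Int :=
            if kx.1 == (i : Int) then p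
            else
              let j : Int := if kx.1 < (i : Int) then kx.1 else kx.1 - 1
              if p ≤ j then j + 1 else j
          match d.get? kx.2 with
          | none => d.insert kx.2 q
          | some v => if q < v then d.insert kx.2 q else d)
        PySem.Dict.empty
    current_order_of_ids.map (fun x => (best.get? x).getD 0)
  else current_order_of_ids

-- ===== PRECONDITION & SPEC =====
def Spec_reorder_tasks (direction : String) (task_id : Int) (current_order_of_ids : List Int) (out : List Int) : Prop := out = reorder_tasks_alt direction task_id current_order_of_ids
instance (direction : String) (task_id : Int) (current_order_of_ids : List Int) (out : List Int) : Decidable (Spec_reorder_tasks direction task_id current_order_of_ids out) := by unfold Spec_reorder_tasks; infer_instance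

-- ===== CLAIM (what is proved, stated in full; the proofs are below) =====
def Claim_equal_reorder_tasks : Prop := ∀ (direction : String) (task_id : Int) (current_order_of_ids : List Int), Dom_reorder_tasks direction task_id current_order_of_ids → Spec_reorder_tasks direction task_id current_order_of_ids (reorder_tasks direction task_id current_order_of_ids)

-- ===== LEMMAS AND PROOFS =====

-- the arithmetic position map of B, in Nat form, and its inverse
def pvF (i p k : Nat) : Nat :=
  if k = i then p
  else if p ≤ (if k < i then k else k - 1) then (if k < i then k else k - 1) + 1
  else (if k < i then k else k - 1)

def pvG (i p r : Nat) : Nat :=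
  if r = p then i
  else if (if r < p then r else r - 1) < i then (if r < p then r else r - 1)
  else (if r < p then r else r - 1) + 1

-- the scalar "keep the minimum" step of B's dict loop
def pvStep : Option Int → Int → Option Int :=
  fun o w => some (match o with | none => w | some v => if w < v then w else v)

theorem pvF_lt (i p k n : Nat) (hi : i < n) (hp : p ≤ n - 1) (hk : k < n) :
    pvF i p k < n := by
  unfold pvF; split_ifs <;> omega

theorem pvG_spec (i p r n : Nat) (hi : i < n) (hp : p ≤ n - 1) (hr : r < n) :
    pvG i p r < n ∧ pvF i p (pvG i p r) = r := by
  unfold pvF pvG; split_ifs <;> omega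

-- the inserted list seen positionally: element k of xs sits at position pvF i p k
theorem getElem?_inserted (xs : List Int) (i p k : Nat)
    (hi : i < xs.length) (hp : p ≤ xs.length - 1) (hk : k < xs.length) :
    ((xs.take i ++ xs.drop (i + 1)).take p ++ xs[i] :: (xs.take i ++ xs.drop (i + 1)).drop p)[pvF i p k]? =
      some xs[k] := by
  have htakelen : ((xs.take i ++ xs.drop (i + 1)).take p).length = p := by simp; omega
  have hNOq : ∀ m : Nat,
      ((xs.take i ++ xs.drop (i + 1)).take p ++ xs[i] :: (xs.take i ++ xs.drop (i + 1)).drop p)[m]? =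
        if m < p then (xs.take i ++ xs.drop (i + 1))[m]?
        else if m = p then some xs[i]
        else (xs.take i ++ xs.drop (i + 1))[m - 1]? := by
    intro m
    by_cases h1 : m < p
    · rw [List.getElem?_append_left (by omega), if_pos h1]
      simp [h1]
    · rw [List.getElem?_append_right (by omega), if_neg h1, htakelen]
      by_cases h2 : m = p
      · subst h2; simp
      · rw [if_neg h2]
        have h3 : m - p = (m - p - 1) + 1 := by omega
        rw [h3]
        show ((xs.take i ++ xs.drop (i + 1)).drop p)[m - p - 1]? = _
        rw [List.getElem?_drop]
        congr 1
        omega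
  have hEq : ∀ j : Nat, (xs.take i ++ xs.drop (i + 1))[j]? =
      if j < i then xs[j]? else xs[j + 1]? := by
    intro j
    by_cases h1 : j < i
    · rw [List.getElem?_append_left (by simp; omega), if_pos h1]
      simp [h1]
    · rw [List.getElem?_append_right (by simp; omega), if_neg h1]
      have : (List.take i xs).length = i := by simp; omega
      rw [this, List.getElem?_drop]
      congr 1
      omega
  unfold pvF
  by_cases hki : k = i
  · subst hki
    rw [if_pos rfl, hNOq p, if_neg (by omega), if_pos rfl]
  · rw [if_neg hki]
    by_cases hkil : k < i
    · simp only [if_pos hkil]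
      by_cases hpj : p ≤ k
      · rw [if_pos hpj, hNOq (k + 1), if_neg (by omega), if_neg (by omega)]
        have : k + 1 - 1 = k := by omega
        rw [this, hEq k, if_pos hkil, List.getElem?_eq_getElem hk]
      · rw [if_neg hpj, hNOq k, if_pos (by omega), hEq k, if_pos hkil,
          List.getElem?_eq_getElem hk]
    · simp only [if_neg hkil]
      have hk1 : 1 ≤ k := by omega
      by_cases hpj : p ≤ k - 1
      · rw [if_pos hpj, hNOq (k - 1 + 1), if_neg (by omega), if_neg (by omega)]
        have h4 : k - 1 + 1 - 1 = k - 1 := by omega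
        rw [h4, hEq (k - 1), if_neg (by omega)]
        have h5 : k - 1 + 1 = k := by omega
        rw [h5, List.getElem?_eq_getElem hk]
      · rw [if_neg hpj, hNOq (k - 1), if_pos (by omega), hEq (k - 1), if_neg (by omega)]
        have h5 : k - 1 + 1 = k := by omega
        rw [h5, List.getElem?_eq_getElem hk]

-- B's dict loop, projected to a single key: a scalar minimum fold over the matching positions
theorem loop_get? (q : Int → Int) (l : List Int) (s : Int) (d : PySem.Dict Int Int) (x : Int) :
    ((PySem.List.enumerate l s).foldl
        (fun d kx =>
          match d.get? kx.2 with
          | none => d.insert kx.2 (q kx.1)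
          | some v => if q kx.1 < v then d.insert kx.2 (q kx.1) else d) d).get? x =
      ((PySem.List.enumerate l s).filterMap
          (fun kx => if kx.2 = x then some (q kx.1) else none)).foldl pvStep (d.get? x) := by
  induction l generalizing s d with
  | nil => simp [PySem.List.enumerate_nil]
  | cons y l ih =>
    rw [PySem.List.enumerate_cons]
    simp only [List.foldl_cons, List.filterMap_cons]
    by_cases hxy : y = x
    · subst hxy
      rw [if_pos rfl]
      simp only [List.foldl_cons]
      cases hd : d.get? y with
      | none =>
        simp only [hd]
        rw [ih, PySem.Dict.get?_insert_self]
        rfl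
      | some v =>
        simp only [hd]
        by_cases hlt : q s < v
        · rw [if_pos hlt, ih, PySem.Dict.get?_insert_self]
          simp [pvStep, hlt]
        · rw [if_neg hlt, ih, hd]
          simp [pvStep, hlt]
    · rw [if_neg hxy]
      cases hd : d.get? y with
      | none =>
        simp only [hd]
        rw [ih, PySem.Dict.get?_insert_of_ne _ _ (fun h => hxy h.symm)]
      | some v =>
        simp only [hd]
        by_cases hlt : q s < v
        · rw [if_pos hlt, ih, PySem.Dict.get?_insert_of_ne _ _ (fun h => hxy h.symm)]
        · rw [if_neg hlt, ih]

-- the scalar minimum fold, characterised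
theorem pvStep_foldl_some (Q : List Int) (v : Int) :
    Q.foldl pvStep (some v) = some (Q.foldl min v) := by
  induction Q generalizing v with
  | nil => rfl
  | cons w Q ih =>
    simp only [List.foldl_cons]
    have hstep : pvStep (some v) w = some (min v w) := by
      show some (if w < v then w else v) = some (min v w)
      rw [min_def]
      congr 1
      split_ifs <;> omega
    rw [hstep]
    exact ih (min v w)

theorem foldl_min_le (Q : List Int) (v : Int) :
    Q.foldl min v ≤ v ∧ ∀ w ∈ Q, Q.foldl min v ≤ w := by
  induction Q generalizing v with
  | nil => simp
  | cons w Q ih =>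
    simp only [List.foldl_cons, List.mem_cons]
    obtain ⟨h1, h2⟩ := ih (min v w)
    refine ⟨le_trans h1 (min_le_left v w), ?_⟩
    rintro u (rfl | hu)
    · exact le_trans h1 (min_le_right v u)
    · exact h2 u hu

theorem foldl_min_mem (Q : List Int) (v : Int) :
    Q.foldl min v = v ∨ Q.foldl min v ∈ Q := by
  induction Q generalizing v with
  | nil => simp
  | cons w Q ih =>
    simp only [List.foldl_cons, List.mem_cons]
    rcases ih (min v w) with h | h
    · rcases le_total v w with hvw | hvw
      · left; rw [h]; exact min_eq_left hvw
      · right; left; rw [h]; exact min_eq_right hvw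
    · right; right; exact h

-- both output loops, as maps
theorem loop_as_map (xs NO : List Int) :
    xs.foldl (fun acc t => acc ++ [(((PySem.List.index? NO t).getD 0 : Nat) : Int)]) [] =
      xs.map (fun t => (((PySem.List.index? NO t).getD 0 : Nat) : Int)) := by
  rw [PySem.List.foldl_append_singleton_eq_map]
  simp

theorem reorder_tasks_spec_aux (direction : String) (task_id : Int) (xs : List Int) :
    reorder_tasks direction task_id xs = reorder_tasks_alt direction task_id xs := by
  by_cases h : task_id ∈ xs
  · unfold reorder_tasks reorder_tasks_alt
    rw [if_pos h, if_pos h]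
    have hs : (PySem.List.index? xs task_id).isSome = true :=
      (PySem.List.index?_isSome_iff xs task_id).mpr h
    obtain ⟨i, hi⟩ := Option.isSome_iff_exists.mp hs
    obtain ⟨hilt, hxi, _⟩ := PySem.List.getElem_of_index?_eq_some hi
    have hn1 : 1 ≤ xs.length := by omega
    simp only [hi, Option.getD_some]
    have hpop : (PySem.List.pop? xs (i : Int)).elim [] Prod.snd = xs.take i ++ xs.drop (i + 1) := by
      rw [PySem.List.pop?_natCast xs i hilt]
      simp [List.eraseIdx_eq_take_drop_succ]
    rw [hpop]
    have hElen : (xs.take i ++ xs.drop (i + 1)).length = xs.length - 1 := by simp; omega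
    -- one common step for every direction branch: insert position p (as Int), 0 ≤ p ≤ n-1
    have main : ∀ p : Int, 0 ≤ p → p ≤ (xs.length : Int) - 1 →
        xs.foldl (fun acc t => acc ++
            [(((PySem.List.index? (PySem.List.insert (xs.take i ++ xs.drop (i + 1)) p task_id) t).getD 0 : Nat) : Int)]) [] =
          xs.map (fun x =>
            (((PySem.List.enumerate xs 0).foldl
                (fun d kx =>
                  let q : Int :=
                    if kx.1 == (i : Int) then p
                    else
                      let j : Int := if kx.1 < (i : Int) then kx.1 else kx.1 - 1
                      if p ≤ j then j + 1 else j
                  match d.get? kx.2 with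
                  | none => d.insert kx.2 q
                  | some v => if q < v then d.insert kx.2 q else d)
                PySem.Dict.empty).get? x).getD 0) := by
      intro p hp0 hp1
      have hpN : (p.toNat : Int) = p := by omega
      rw [← hpN, PySem.List.insert_natCast _ p.toNat task_id (by omega), ← hxi]
      rw [loop_as_map]
      set pN : Nat := p.toNat with hpNdef
      set NO : List Int :=
        (xs.take i ++ xs.drop (i + 1)).take pN ++ xs[i] :: (xs.take i ++ xs.drop (i + 1)).drop pN with hNO
      -- the per-index q of B's loop is pvF, cast to Int
      set Q : Int → Int := fun kI =>
        if kI == (i : Int) then (pN : Int)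
        else
          let j : Int := if kI < (i : Int) then kI else kI - 1
          if (pN : Int) ≤ j then j + 1 else j with hQ
      have hQF : ∀ k : Nat, Q (k : Int) = ((pvF i pN k : Nat) : Int) := by
        intro k
        simp only [hQ, pvF, beq_iff_eq, Int.natCast_inj]
        split_ifs <;> push_cast <;> omega
      apply List.map_congr_left
      intro t ht
      obtain ⟨k0, hk0, hxk0⟩ := List.mem_iff_getElem.mp ht
      -- B's dict entry for t: the minimum of pvF over t's occurrences
      change (((PySem.List.index? NO t).getD 0 : Nat) : Int) = (((PySem.List.enumerate xs 0).foldl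
          (fun d kx =>
            match d.get? kx.2 with
            | none => d.insert kx.2 (Q kx.1)
            | some v => if Q kx.1 < v then d.insert kx.2 (Q kx.1) else d)
          PySem.Dict.empty).get? t).getD 0
      rw [loop_get? Q xs 0 PySem.Dict.empty t]
      have hempty : (PySem.Dict.empty : PySem.Dict Int Int).get? t = none := by
        simp [PySem.Dict.empty, PySem.Dict.get?]
      rw [hempty]
      -- the occurrence-position values
      set L : List Int :=
        (PySem.List.enumerate xs 0).filterMap
          (fun kx => if kx.2 = t then some (Q kx.1) else none) with hL
      have hmemL : ∀ w : Int, w ∈ L ↔ ∃ k : Nat, ∃ hk : k < xs.length, xs[k] = t ∧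
          w = ((pvF i pN k : Nat) : Int) := by
        intro w
        rw [hL, List.mem_filterMap]
        constructor
        · rintro ⟨⟨kI, x⟩, hmem, hf⟩
          obtain ⟨k, hk, hpair⟩ := (PySem.List.mem_enumerate_iff _ _ _).mp hmem
          have h1 : kI = 0 + (k : Int) := congrArg Prod.fst hpair
          have h2 : x = xs[k] := congrArg Prod.snd hpair
          by_cases hx : x = t
          · rw [if_pos hx] at hf
            refine ⟨k, hk, by rw [← h2, hx], ?_⟩
            rw [← Option.some_inj.mp hf, h1, zero_add, hQF]
          · rw [if_neg hx] at hf
            exact absurd hf (by simp)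
        · rintro ⟨k, hk, hxkt, rfl⟩
          refine ⟨(0 + (k : Int), xs[k]), (PySem.List.mem_enumerate_iff _ _ _).mpr ⟨k, hk, rfl⟩, ?_⟩
          rw [if_pos hxkt, zero_add, hQF]
      -- L is nonempty: k0 is an occurrence
      have hk0L : ((pvF i pN k0 : Nat) : Int) ∈ L :=
        (hmemL _).mpr ⟨k0, hk0, hxk0, rfl⟩
      obtain ⟨w0, L', hL'⟩ : ∃ w0 L', L = w0 :: L' := by
        cases hc : L with
        | nil => rw [hc] at hk0L; exact absurd hk0L (List.not_mem_nil)
        | cons a b => exact ⟨a, b, rfl⟩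
      rw [hL']
      simp only [List.foldl_cons]
      rw [show pvStep none w0 = some w0 from rfl, pvStep_foldl_some]
      -- A's value: the first index of t in NO
      have hpn : pN ≤ xs.length - 1 := by omega
      have hsNO : (PySem.List.index? NO t).isSome = true := by
        rw [PySem.List.index?_isSome_iff]
        have := getElem?_inserted xs i pN k0 hilt hpn hk0
        rw [← hNO, hxk0] at this
        exact List.mem_of_getElem? this
      obtain ⟨r, hr⟩ := Option.isSome_iff_exists.mp hsNO
      obtain ⟨hrlt, hNOr, hrmin⟩ := PySem.List.getElem_of_index?_eq_some hr
      have hNOlen : NO.length = xs.length := by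
        rw [hNO]; simp; omega
      -- r is one of the occurrence values …
      have hrL : ((r : Nat) : Int) ∈ L := by
        obtain ⟨hglt, hgf⟩ := pvG_spec i pN r xs.length hilt hpn (by omega)
        have hNOg := getElem?_inserted xs i pN (pvG i pN r) hilt hpn hglt
        rw [← hNO, hgf, List.getElem?_eq_getElem hrlt, hNOr] at hNOg
        exact (hmemL _).mpr ⟨pvG i pN r, hglt, (Option.some_inj.mp hNOg).symm, by rw [hgf]⟩
      -- … and no occurrence value is smaller
      have hrle : ∀ w ∈ L, ((r : Nat) : Int) ≤ w := by
        intro w hw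
        obtain ⟨k, hk, hxkt, rfl⟩ := (hmemL w).mp hw
        have hNOk := getElem?_inserted xs i pN k hilt hpn hk
        rw [← hNO, hxkt] at hNOk
        by_contra hcon
        have hlt : pvF i pN k < r := by omega
        have hflt : pvF i pN k < NO.length := by
          rw [hNOlen]; exact pvF_lt _ _ _ _ hilt hpn hk
        rw [List.getElem?_eq_getElem hflt] at hNOk
        exact hrmin _ hlt (Option.some_inj.mp hNOk)
      -- the minimum characterisation pins both to the same value
      rw [hr]
      simp only [Option.getD_some]
      obtain ⟨hle1, hle2⟩ := foldl_min_le L' w0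
      have hmem := foldl_min_mem L' w0
      have h1 : ((r : Nat) : Int) ≤ L'.foldl min w0 := by
        rcases hmem with hm | hm
        · rw [hm]; exact hrle w0 (by rw [hL']; exact List.mem_cons_self)
        · exact hrle _ (by rw [hL']; exact List.mem_cons_of_mem _ hm)
      have h2 : L'.foldl min w0 ≤ ((r : Nat) : Int) := by
        rw [hL'] at hrL
        rcases List.mem_cons.mp hrL with hm | hm
        · exact le_trans hle1 (le_of_eq hm.symm)
        · exact hle2 _ hm
      omega
    split_ifs with h1 h2 h3 h4
    · exact main _ (by omega) (by omega)
    · rw [hElen, show ((xs.length : Int) - 1) = ((xs.length - 1 : Nat) : Int) by omega]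
      exact main _ (by omega) (by omega)
    · exact main 0 (by omega) (by omega)
    · rw [hElen, show ((xs.length : Int) - 1) = ((xs.length - 1 : Nat) : Int) by omega]
      exact main _ (by omega) (by omega)
    · exact main _ (by omega) (by omega)
  · unfold reorder_tasks reorder_tasks_alt
    rw [if_neg h, if_neg h]

-- ===== VERDICT (by name: the statement is the Claim_ definition above) =====
theorem reorder_tasks_spec : Claim_equal_reorder_tasks := by
  intro direction task_id xs _
  exact reorder_tasks_spec_aux direction task_id xs
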